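-- pv_equiv track=rewrite | github.com/loganzzz7/python-g4g-1-week | uchicago_placement_exam/bins.py | total_wasted_space
-- ===== SOURCE A (Python) =====
-- def total_wasted_space(shipments: list[int], bin_size: int) -> int:
--     '''
--     This function takes a list of integers, representing the number of items
--     in each shipment, and a bin size, and computes the total wasted
--     space across all shipments.
--
--     Arguments:
--         shipments: a list of integers
--         bin_size: the capacity of each bin (all bins have the same capacity)
--
--     Returns:
--         The total wasted space across all shipments.
--     '''
--
--     # Your code here
--     # Return is included to verify the test code.
--     total_wasted_space = 0
--
--     for shipment in shipments:
--         left_over = shipment % bin_size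
--         if left_over != 0:
--             individual_wasted_space = bin_size - left_over
--             total_wasted_space = total_wasted_space + individual_wasted_space
--     return total_wasted_space
-- ===== SOURCE B (Python) =====
-- def total_wasted_space(shipments: list[int], bin_size: int) -> int:
--     '''Histogram decomposition: bucket shipments by their remainder class
--     modulo bin_size, then charge each distinct remainder's waste once,
--     weighted by its multiplicity.'''
--     counts = {}
--     for s in shipments:
--         r = s % bin_size
--         counts[r] = counts.get(r, 0) + 1
--     wasted = 0
--     for r, c in counts.items():
--         if r != 0:
--             wasted += (bin_size - r) * c
--     return wasted
-- ===== Notes on version B (the rewrite author's own statement) =====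
-- stated objective: alternative
-- what changed: Replaces A's per-element branch-and-accumulate with a two-stage histogram: first build a dict counting shipments per remainder class mod bin_size, then sum (bin_size - r) * count over the distinct nonzero remainders, so the waste of a remainder class is computed once however many shipments share it.
import Mathlib
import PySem

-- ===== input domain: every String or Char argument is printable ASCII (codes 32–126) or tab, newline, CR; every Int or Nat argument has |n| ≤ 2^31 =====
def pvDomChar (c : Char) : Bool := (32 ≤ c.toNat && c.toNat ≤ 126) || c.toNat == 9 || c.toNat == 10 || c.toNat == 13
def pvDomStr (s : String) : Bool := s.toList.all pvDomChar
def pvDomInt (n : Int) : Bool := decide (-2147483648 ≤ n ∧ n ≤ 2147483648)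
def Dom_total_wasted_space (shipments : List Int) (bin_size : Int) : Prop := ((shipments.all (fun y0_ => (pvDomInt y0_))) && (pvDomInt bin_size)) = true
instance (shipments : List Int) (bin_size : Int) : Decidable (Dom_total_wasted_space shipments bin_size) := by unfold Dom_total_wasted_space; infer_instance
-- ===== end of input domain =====

-- B replaces A's per-element branch-and-accumulate with a two-stage histogram over remainder
-- classes (a dict of counts, then a weighted sum over distinct remainders); equal cost,
-- genuinely different data structure and traversal.


-- ===== PORT A =====
def total_wasted_space (shipments : List Int) (bin_size : Int) : Int :=
  shipments.foldl (fun total_wasted shipment =>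
    let left_over := PySem.Int.mod shipment bin_size
    if left_over ≠ 0 then total_wasted + (bin_size - left_over) else total_wasted) 0

-- ===== PORT B =====
def total_wasted_space_alt (shipments : List Int) (bin_size : Int) : Int :=
  let counts := shipments.foldl (fun d s =>
      let r := PySem.Int.mod s bin_size
      d.insert r (d.getD r 0 + 1)) (PySem.Dict.empty : PySem.Dict Int Int)
  counts.items.foldl (fun wasted rc =>
      if rc.1 ≠ 0 then wasted + (bin_size - rc.1) * rc.2 else wasted) 0

-- ===== PRECONDITION & SPEC =====
-- Pre_ excludes exactly the inputs where Python raises ZeroDivisionError: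
-- bin_size = 0 with a nonempty shipment list (both A and B raise there).
def Pre_total_wasted_space (shipments : List Int) (bin_size : Int) : Prop :=
  shipments = [] ∨ bin_size ≠ 0
instance (shipments : List Int) (bin_size : Int) : Decidable (Pre_total_wasted_space shipments bin_size) := by unfold Pre_total_wasted_space; infer_instance

def pvWitness_total_wasted_space : List Int × Int := ([7, 10, 3], 4)

def Spec_total_wasted_space (shipments : List Int) (bin_size : Int) (out : Int) : Prop := out = total_wasted_space_alt shipments bin_size
instance (shipments : List Int) (bin_size : Int) (out : Int) : Decidable (Spec_total_wasted_space shipments bin_size out) := by unfold Spec_total_wasted_space; infer_instance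

-- ===== CLAIM (what is proved, stated in full; the proofs are below) =====
def Claim_equal_total_wasted_space : Prop := ∀ (shipments : List Int) (bin_size : Int), Dom_total_wasted_space shipments bin_size → Pre_total_wasted_space shipments bin_size → Spec_total_wasted_space shipments bin_size (total_wasted_space shipments bin_size)

-- ===== LEMMAS AND PROOFS =====

-- Per-remainder waste weight.
def pvWaste (b r : Int) : Int := if r ≠ 0 then b - r else 0

-- Weight of a dict: sum of waste * count over its key list.
def pvW (b : Int) (d : PySem.Dict Int Int) : Int :=
  (d.keys.map (fun k => pvWaste b k * d.getD k 0)).sum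

-- Summing a function changed at one key of a nodup list shifts the sum by the change there.
lemma sum_map_update (ks : List Int) (r : Int) (g g' : Int → Int)
    (hnd : ks.Nodup) (hmem : r ∈ ks) (hg : ∀ k, k ≠ r → g' k = g k) :
    (ks.map g').sum = (ks.map g).sum + (g' r - g r) := by
  induction ks with
  | nil => cases hmem
  | cons k ks ih =>
    rcases List.nodup_cons.mp hnd with ⟨hk, hnd'⟩
    by_cases hkr : k = r
    · subst hkr
      have : ks.map g' = ks.map g := List.map_congr_left (fun x hx => hg x (fun h => hk (h ▸ hx)))
      simp [this]; ring
    · have hmem' : r ∈ ks := by cases hmem with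
        | head => exact absurd rfl hkr
        | tail _ h => exact h
      simp only [List.map_cons, List.sum_cons, ih hnd' hmem', hg k hkr]
      ring

-- Inserting (getD r 0 + 1) at key r increases the weight by pvWaste b r.
lemma pvW_insert (b : Int) (d : PySem.Dict Int Int) (r : Int) (hnd : d.keys.Nodup) :
    pvW b (d.insert r (d.getD r 0 + 1)) = pvW b d + pvWaste b r := by
  by_cases hc : d.contains r
  · have hkeys : (d.insert r (d.getD r 0 + 1)).keys = d.keys :=
      PySem.Dict.keys_insert_of_contains d _ hc
    have hmem : r ∈ d.keys := (PySem.Dict.contains_iff_mem_keys d r).mp hc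
    unfold pvW
    rw [hkeys]
    rw [sum_map_update d.keys r
      (fun k => pvWaste b k * d.getD k 0)
      (fun k => pvWaste b k * (d.insert r (d.getD r 0 + 1)).getD k 0)
      hnd hmem
      (fun k hk => by simp only [PySem.Dict.getD_insert_of_ne d _ _ hk])]
    rw [PySem.Dict.getD_insert_self]
    ring
  · have hc' : d.contains r = false := by simpa using hc
    have hkeys : (d.insert r (d.getD r 0 + 1)).keys = d.keys ++ [r] :=
      PySem.Dict.keys_insert_of_not_contains d _ hc'
    have hnmem : r ∉ d.keys := fun h => by
      simp [(PySem.Dict.contains_iff_mem_keys d r).mpr h] at hc'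
    unfold pvW
    rw [hkeys, List.map_append, List.sum_append]
    have h1 : (d.keys.map (fun k => pvWaste b k * (d.insert r (d.getD r 0 + 1)).getD k 0))
        = d.keys.map (fun k => pvWaste b k * d.getD k 0) :=
      List.map_congr_left (fun k hk => by
        simp only [PySem.Dict.getD_insert_of_ne d _ _ (fun h : k = r => hnmem (by rw [← h]; exact hk))])
    rw [h1]
    simp only [List.map_cons, List.map_nil, List.sum_cons, List.sum_nil,
      PySem.Dict.getD_insert_self, PySem.Dict.getD_of_not_contains d _ hc']
    ring

-- Building the histogram over xs raises the weight by the list of per-element wastes.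
lemma pvW_build (b : Int) (xs : List Int) (d : PySem.Dict Int Int) (hnd : d.keys.Nodup) :
    pvW b (xs.foldl (fun d s =>
        let r := PySem.Int.mod s b
        d.insert r (d.getD r 0 + 1)) d)
      = pvW b d + (xs.map (fun s => pvWaste b (PySem.Int.mod s b))).sum := by
  induction xs generalizing d with
  | nil => simp
  | cons x xs ih =>
    simp only [List.foldl_cons, List.map_cons, List.sum_cons]
    rw [ih _ (PySem.Dict.nodup_keys_insert _ _ _ hnd), pvW_insert b d _ hnd]
    ring

-- B's second fold over the items equals the dict weight.
lemma items_fold_eq (b : Int) (l : List (Int × Int)) (acc : Int) :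
    l.foldl (fun wasted rc => if rc.1 ≠ 0 then wasted + (b - rc.1) * rc.2 else wasted) acc
      = acc + (l.map (fun p => pvWaste b p.1 * p.2)).sum := by
  induction l generalizing acc with
  | nil => simp
  | cons p l ih =>
    simp only [List.foldl_cons, List.map_cons, List.sum_cons, ih]
    by_cases h : p.1 ≠ 0
    · simp [pvWaste, h]; ring
    · simp [pvWaste, h]

-- A's fold equals the sum of per-element wastes.
lemma a_fold_eq (b : Int) (xs : List Int) (acc : Int) :
    xs.foldl (fun total_wasted shipment =>
        let left_over := PySem.Int.mod shipment b
        if left_over ≠ 0 then total_wasted + (b - left_over) else total_wasted) acc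
      = acc + (xs.map (fun s => pvWaste b (PySem.Int.mod s b))).sum := by
  induction xs generalizing acc with
  | nil => simp
  | cons x xs ih =>
    simp only [List.foldl_cons, List.map_cons, List.sum_cons, ih]
    by_cases h : PySem.Int.mod x b ≠ 0
    · simp [pvWaste, h]; ring
    · simp [pvWaste, h]

-- ===== VERDICT (by name: the statement is the Claim_ definition above) =====
theorem total_wasted_space_spec : Claim_equal_total_wasted_space := by
  intro shipments bin_size _ _
  unfold Spec_total_wasted_space total_wasted_space total_wasted_space_alt
  set build := shipments.foldl (fun d s =>
      let r := PySem.Int.mod s bin_size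
      d.insert r (d.getD r 0 + 1)) (PySem.Dict.empty : PySem.Dict Int Int) with hbuild
  have hnd : (PySem.Dict.empty : PySem.Dict Int Int).keys.Nodup := PySem.Dict.nodup_keys_empty
  have hndb : build.keys.Nodup := by
    rw [hbuild]; exact PySem.Dict.nodup_keys_foldl_insert_key shipments _ _ _ hnd
  rw [items_fold_eq, a_fold_eq]
  have hitems : build.items = build.keys.map (fun k => (k, build.getD k 0)) :=
    PySem.Dict.items_eq_map_keys build hndb 0
  rw [hitems, List.map_map]
  have hW := pvW_build bin_size shipments PySem.Dict.empty hnd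
  rw [← hbuild] at hW
  unfold pvW at hW
  simp only [PySem.Dict.keys_empty, List.map_nil, List.sum_nil, zero_add] at hW
  simp only [Function.comp_def]
  rw [← hW]
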